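-- pv_equiv track=rewrite | github.com/minnseong/Algorithm | programmers/Level 3/immigration.py | solution
-- ===== SOURCE A (Python) =====
-- def solution(n, times):
--
--     start = 0
--     end = max(times) * n
--
--     while (start <= end):
--         mid = (start + end) // 2
--
--         total = 0
--         for t in times:
--             total += (mid // t)
--
--         if (total >= n):
--             end = mid - 1
--         else:
--             start = mid + 1
--
--     return start
-- ===== SOURCE B (Python) =====
-- def solution(n, times):
--     # Alternative exact re-implementation: the booth list is aggregated once into a
--     # value -> multiplicity table, so each probe of the answer search sums over the
--     # DISTINCT booth times only, and the search itself is a recursive bisection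
--     # instead of A's mutate-in-place while loop.  (A heap simulation of the queues
--     # was rejected: it could not reproduce A's exact values on inputs with
--     # non-positive booth times, on which A still returns.)
--     top = max(times) * n
--     cnt = {}
--     for t in times:
--         cnt[t] = cnt.get(t, 0) + 1
--     groups = list(cnt.items())
--
--     def served(T):
--         return sum(c * (T // t) for t, c in groups)
--
--     def bisect(lo, hi):
--         if lo > hi:
--             return lo
--         mid = (lo + hi) // 2
--         if served(mid) >= n:
--             return bisect(lo, mid - 1)
--         return bisect(mid + 1, hi)
--
--     return bisect(0, top)
-- ===== Notes on version B (the rewrite author's own statement) =====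
-- stated objective: alternative
-- what changed: The per-probe inner scan over the whole booth list is replaced by a value-to-multiplicity table built once (each probe sums count*(T//t) over the distinct booth times only), and A's mutate-in-place while loop becomes a recursive bisection.
import Mathlib
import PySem

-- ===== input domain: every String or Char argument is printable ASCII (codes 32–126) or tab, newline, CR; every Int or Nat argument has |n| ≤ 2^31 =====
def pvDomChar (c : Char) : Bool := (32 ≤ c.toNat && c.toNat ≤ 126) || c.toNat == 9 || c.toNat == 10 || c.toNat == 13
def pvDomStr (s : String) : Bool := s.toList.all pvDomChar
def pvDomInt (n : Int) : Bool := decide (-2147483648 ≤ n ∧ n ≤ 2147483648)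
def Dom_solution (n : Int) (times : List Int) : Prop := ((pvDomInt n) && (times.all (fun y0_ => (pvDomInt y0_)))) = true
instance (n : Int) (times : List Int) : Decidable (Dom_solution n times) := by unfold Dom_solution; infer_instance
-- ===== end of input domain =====

-- B aggregates the booth list into a value→multiplicity table built once (each probe
-- sums over distinct values only) and replaces A's while loop by a recursive bisection;
-- objective: alternative (same asymptotic cost on distinct-valued input).

-- ===== PORT A =====
def solutionLoop (n : Int) (times : List Int) (start e : Int) : Int :=
  if h : start ≤ e then
    let mid := PySem.Int.floordiv (start + e) 2
    let total := times.foldl (fun tot t => tot + PySem.Int.floordiv mid t) 0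
    if total ≥ n then solutionLoop n times start (mid - 1)
    else solutionLoop n times (mid + 1) e
  else start
termination_by (e + 1 - start).toNat
decreasing_by
  · have hb := PySem.Int.floordiv_two_mid_bounds h; omega
  · have hb := PySem.Int.floordiv_two_mid_bounds h; omega

def solution (n : Int) (times : List Int) : Int :=
  solutionLoop n times 0 (((PySem.List.max? times (fun y => y)).getD 0) * n)

-- ===== PORT B =====
def bCounts (times : List Int) : PySem.Dict Int Int :=
  times.foldl (fun d t => d.insert t (d.getD t 0 + 1)) PySem.Dict.empty

def bServed (groups : List (Int × Int)) (T : Int) : Int :=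
  (groups.map (fun p => p.2 * PySem.Int.floordiv T p.1)).sum

def bBisect (n : Int) (groups : List (Int × Int)) (lo hi : Int) : Int :=
  if h : lo > hi then lo
  else
    let mid := PySem.Int.floordiv (lo + hi) 2
    if bServed groups mid ≥ n then bBisect n groups lo (mid - 1)
    else bBisect n groups (mid + 1) hi
termination_by (hi + 1 - lo).toNat
decreasing_by
  · have hb := PySem.Int.floordiv_two_mid_bounds (by omega : lo ≤ hi); omega
  · have hb := PySem.Int.floordiv_two_mid_bounds (by omega : lo ≤ hi); omega

def solution_alt (n : Int) (times : List Int) : Int :=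
  bBisect n (bCounts times).items 0 (((PySem.List.max? times (fun y => y)).getD 0) * n)

-- ===== PRECONDITION & SPEC =====
-- Pre_ excludes exactly the inputs where Python A raises: the empty list (max([]) is a
-- ValueError) and lists containing 0 whose search loop runs (mid // 0 is a ZeroDivisionError,
-- i.e. 0 ∈ times while max(times)*n ≥ 0, that is unless some entry is positive and n < 0).
def Pre_solution (n : Int) (times : List Int) : Prop :=
  times ≠ [] ∧ ((0 : Int) ∈ times → (∃ t ∈ times, 0 < t) ∧ n < 0)
instance (n : Int) (times : List Int) : Decidable (Pre_solution n times) := by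
  unfold Pre_solution; infer_instance

def pvWitness_solution : Int × List Int := (6, [7, 10])

def Spec_solution (n : Int) (times : List Int) (out : Int) : Prop := out = solution_alt n times
instance (n : Int) (times : List Int) (out : Int) : Decidable (Spec_solution n times out) := by unfold Spec_solution; infer_instance

-- ===== CLAIM (what is proved, stated in full; the proofs are below) =====
def Claim_equal_solution : Prop := ∀ (n : Int) (times : List Int), Dom_solution n times → Pre_solution n times → Spec_solution n times (solution n times)

-- ===== LEMMAS AND PROOFS =====

-- a sum over a Nodup list of a function vanishing except at its member x picks out f x
lemma pv_sum_ite (s : List Int) (hn : s.Nodup) (x : Int) (hx : x ∈ s) (f : Int → Int) :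
    (s.map (fun k => if k = x then f k else 0)).sum = f x := by
  induction s with
  | nil => cases hx
  | cons a t ih =>
    rcases List.mem_cons.mp hx with rfl | hxt
    · have hxt : x ∉ t := (List.nodup_cons.mp hn).1
      simp only [List.map_cons, List.sum_cons]
      have hz : (t.map (fun k => if k = x then f k else 0)).sum = 0 := by
        apply List.sum_eq_zero
        intro y hy
        rcases List.mem_map.mp hy with ⟨k, hk, rfl⟩
        have : k ≠ x := fun h => hxt (h ▸ hk)
        simp [this]
      simp [hz]
    · have hax : a ≠ x := fun h => (List.nodup_cons.mp hn).1 (h ▸ hxt)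
      simp only [List.map_cons, List.sum_cons, if_neg hax]
      rw [ih (List.nodup_cons.mp hn).2 hxt]
      omega

-- grouping: summing f over the distinct values weighted by multiplicity = summing f over the list
lemma pv_sum_grouped (xs : List Int) (f : Int → Int) :
    ((PySem.Set.ofList xs).map (fun k => (xs.count k : Int) * f k)).sum = (xs.map f).sum := by
  induction xs using List.reverseRecOn with
  | nil => simp [PySem.Set.ofList_nil]
  | append_singleton ys x ih =>
    rw [PySem.Set.ofList_append_singleton]
    by_cases hx : x ∈ ys
    · rw [PySem.Set.add_of_mem (by rwa [PySem.Set.mem_ofList])]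
      have hpt : ∀ k ∈ PySem.Set.ofList ys,
          ((ys ++ [x]).count k : Int) * f k
            = (ys.count k : Int) * f k + (if k = x then f k else 0) := by
        intro k _
        rw [List.count_append]
        by_cases hkx : k = x
        · subst hkx
          rw [if_pos rfl]
          have : List.count k [k] = 1 := by simp
          rw [this]
          push_cast
          ring
        · rw [if_neg hkx]
          have : List.count k [x] = 0 := by simp [List.count_cons]; omega
          rw [this]
          push_cast
          ring
      rw [List.map_congr_left hpt]
      have hsplit : ((PySem.Set.ofList ys).map
            (fun k => (ys.count k : Int) * f k + (if k = x then f k else 0))).sum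
          = ((PySem.Set.ofList ys).map (fun k => (ys.count k : Int) * f k)).sum
            + ((PySem.Set.ofList ys).map (fun k => if k = x then f k else 0)).sum := by
        induction PySem.Set.ofList ys with
        | nil => simp
        | cons a t iht => simp only [List.map_cons, List.sum_cons, iht]; ring
      rw [hsplit, ih,
        pv_sum_ite _ (PySem.Set.nodup_ofList ys) x (by rwa [PySem.Set.mem_ofList]) f]
      simp
    · rw [PySem.Set.add_of_not_mem (by rwa [PySem.Set.mem_ofList])]
      have hpt : ∀ k ∈ PySem.Set.ofList ys,
          ((ys ++ [x]).count k : Int) * f k = (ys.count k : Int) * f k := by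
        intro k hk
        have hk' : k ∈ ys := by rwa [PySem.Set.mem_ofList] at hk
        have hkx : k ≠ x := fun h => hx (h ▸ hk')
        have : List.count k [x] = 0 := by simp [List.count_cons]; omega
        rw [List.count_append, this]
        simp
      rw [List.map_append, List.sum_append, List.map_congr_left hpt, ih]
      simp [List.count_append, List.count_singleton, List.count_eq_zero_of_not_mem hx]

lemma pv_served_eq (times : List Int) (T : Int) :
    bServed (bCounts times).items T
      = times.foldl (fun tot t => tot + PySem.Int.floordiv T t) 0 := by
  unfold bCounts bServed
  rw [PySem.Dict.foldl_insert_getD_add_one_eq_counter, PySem.Dict.items_counter,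
    List.map_map]
  simp only [Function.comp_def]
  rw [pv_sum_grouped times (fun t => PySem.Int.floordiv T t), PySem.List.foldl_add]
  simp

lemma pv_bisect_eq (n : Int) (times : List Int) :
    ∀ (lo hi : Int), solutionLoop n times lo hi = bBisect n (bCounts times).items lo hi := by
  intro lo hi
  fun_induction solutionLoop n times lo hi with
  | case1 lo hi h mid total hge ih =>
    have htot : List.foldl (fun tot t => tot + PySem.Int.floordiv mid t) 0 times ≥ n := by
      simp only [total] at hge
      simpa [List.foldl_attach] using hge
    rw [bBisect, dif_neg (by omega : ¬ lo > hi)]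
    simp only [pv_served_eq]
    rw [if_pos htot, if_pos htot]
    exact ih
  | case2 lo hi h mid total hlt ih =>
    have htot : ¬ List.foldl (fun tot t => tot + PySem.Int.floordiv mid t) 0 times ≥ n := by
      simp only [total] at hlt
      simpa [List.foldl_attach] using hlt
    rw [bBisect, dif_neg (by omega : ¬ lo > hi)]
    simp only [pv_served_eq]
    rw [if_neg htot, if_neg htot]
    exact ih
  | case3 lo hi h =>
    rw [bBisect]
    simp [show lo > hi by omega]

-- ===== VERDICT (by name: the statement is the Claim_ definition above) =====
theorem solution_spec : Claim_equal_solution := by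
  intro n times _ _
  show solution n times = solution_alt n times
  unfold solution solution_alt
  exact pv_bisect_eq n times 0 _
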